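-- pv_equiv track=rewrite | github.com/my-hon/ntl-gnn-gapfilling | ntl_graph_accel/graph_builder.py | filter_triplets
-- ===== SOURCE A (Python) =====
-- def filter_triplets(node_pos_list, new_triplet):
--     """
--     精确复制参考实现的 filter_triplets。
--     筛选满足条件的三元组：相同时间不同空间 + 相同空间不同时间。
--     """
--     x_new, y_new, z_new = new_triplet
--     time_filtered = [
--         triplet
--         for triplet in node_pos_list
--         if (triplet[0] == x_new and (triplet[1] != y_new or triplet[2] != z_new))
--     ]
--     spatial_filtered = [
--         triplet
--         for triplet in node_pos_list
--         if ((triplet[1] == y_new or triplet[2] == z_new) and triplet[0] != x_new)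
--     ]
--     return time_filtered + spatial_filtered
-- ===== SOURCE B (Python) =====
-- def filter_triplets(node_pos_list, new_triplet):
--     """Classify each triplet into category 0 (same time, different space),
--     1 (same space, different time) or 2 (dropped); discard category 2 and
--     stable-sort the survivors by category.  Stability keeps the original
--     order inside each category, and 0 < 1 puts the time matches first."""
--     x_new, y_new, z_new = new_triplet
--
--     def category(t):
--         if t[0] == x_new:
--             return 0 if (t[1] != y_new or t[2] != z_new) else 2
--         return 1 if (t[1] == y_new or t[2] == z_new) else 2
--
--     kept = [t for t in node_pos_list if category(t) != 2]
--     return sorted(kept, key=category)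
-- ===== Notes on version B (the rewrite author's own statement) =====
-- stated objective: alternative
-- what changed: A's two independent filtering passes plus concatenation are replaced by a classification into categories 0/1/2 followed by a stable sort by category: category-2 triplets are dropped and sorted(key=category) realises the 'time matches first, spatial matches second, original order within each group' result.
import Mathlib
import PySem

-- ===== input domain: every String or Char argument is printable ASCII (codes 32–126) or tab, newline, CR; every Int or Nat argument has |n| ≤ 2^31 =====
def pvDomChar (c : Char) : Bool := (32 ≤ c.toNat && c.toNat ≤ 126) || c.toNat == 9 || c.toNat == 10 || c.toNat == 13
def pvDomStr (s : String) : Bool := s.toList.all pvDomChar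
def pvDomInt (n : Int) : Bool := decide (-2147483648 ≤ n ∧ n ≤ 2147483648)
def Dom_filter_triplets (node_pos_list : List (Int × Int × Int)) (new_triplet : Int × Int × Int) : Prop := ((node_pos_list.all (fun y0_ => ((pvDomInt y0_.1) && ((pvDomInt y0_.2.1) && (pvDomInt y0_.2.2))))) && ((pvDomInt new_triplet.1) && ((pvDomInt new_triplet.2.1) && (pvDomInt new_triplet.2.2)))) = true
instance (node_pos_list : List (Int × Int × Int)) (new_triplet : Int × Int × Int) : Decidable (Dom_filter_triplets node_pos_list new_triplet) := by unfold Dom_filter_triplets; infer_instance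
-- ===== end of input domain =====

-- B replaces A's two filtering passes + concatenation by classify-into-categories-0/1/2, drop 2, stable sort by category (objective: alternative algorithm, same result by stability).

-- ===== PORT A =====
-- two list comprehensions over node_pos_list, then concatenation
def filter_triplets (node_pos_list : List (Int × Int × Int)) (new_triplet : Int × Int × Int) : List (Int × Int × Int) :=
  let x_new := new_triplet.1
  let y_new := new_triplet.2.1
  let z_new := new_triplet.2.2
  let time_filtered := node_pos_list.filter
    (fun t => t.1 == x_new && (t.2.1 != y_new || t.2.2 != z_new))
  let spatial_filtered := node_pos_list.filter
    (fun t => (t.2.1 == y_new || t.2.2 == z_new) && t.1 != x_new)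
  time_filtered ++ spatial_filtered

-- ===== PORT B =====
-- Source B's helper 'category'
def ft_category (x_new y_new z_new : Int) (t : Int × Int × Int) : Int :=
  if t.1 = x_new then (if t.2.1 ≠ y_new ∨ t.2.2 ≠ z_new then 0 else 2)
  else if t.2.1 = y_new ∨ t.2.2 = z_new then 1 else 2

-- drop category 2, then Python's stable sort by category (PySem.List.sorted)
def filter_triplets_alt (node_pos_list : List (Int × Int × Int)) (new_triplet : Int × Int × Int) : List (Int × Int × Int) :=
  let x_new := new_triplet.1
  let y_new := new_triplet.2.1
  let z_new := new_triplet.2.2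
  let kept := node_pos_list.filter (fun t => ft_category x_new y_new z_new t != 2)
  PySem.List.sorted kept (ft_category x_new y_new z_new)

-- ===== PRECONDITION & SPEC =====
def Spec_filter_triplets (node_pos_list : List (Int × Int × Int)) (new_triplet : Int × Int × Int) (out : List (Int × Int × Int)) : Prop := out = filter_triplets_alt node_pos_list new_triplet
instance (node_pos_list : List (Int × Int × Int)) (new_triplet : Int × Int × Int) (out : List (Int × Int × Int)) : Decidable (Spec_filter_triplets node_pos_list new_triplet out) := by unfold Spec_filter_triplets; infer_instance

-- ===== CLAIM (what is proved, stated in full; the proofs are below) =====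
def Claim_equal_filter_triplets : Prop := ∀ (node_pos_list : List (Int × Int × Int)) (new_triplet : Int × Int × Int), Dom_filter_triplets node_pos_list new_triplet → Spec_filter_triplets node_pos_list new_triplet (filter_triplets node_pos_list new_triplet)

-- ===== LEMMAS AND PROOFS =====
-- inserting x between a block it is not-before and a block it is before
theorem insertBy_middle {α : Type} (before : α → α → Bool) (x : α) (zs os : List α)
    (h1 : ∀ y ∈ zs, before x y = false) (h2 : ∀ y ∈ os, before x y = true) :
    PySem.List.insertBy before x (zs ++ os) = zs ++ x :: os := by
  induction zs with
  | nil =>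
    cases os with
    | nil => rfl
    | cons o os' => simp [PySem.List.insertBy, h2 o (by simp)]
  | cons z zs' ih =>
    simp only [List.cons_append, PySem.List.insertBy, h1 z (by simp), Bool.false_eq_true,
      if_false]
    exact congrArg (z :: ·) (ih (fun y hy => h1 y (by simp [hy])))

-- stable insertion sort with a 0/1-valued key is filter-0 ++ filter-1
theorem foldl_insertBy_two_valued {α : Type} (k : α → Int) (xs zs os : List α)
    (hz : ∀ y ∈ zs, k y = 0) (ho : ∀ y ∈ os, k y = 1)
    (hx : ∀ t ∈ xs, k t = 0 ∨ k t = 1) :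
    xs.foldl (fun acc x => PySem.List.insertBy (fun a b => decide (k a < k b)) x acc) (zs ++ os)
      = (zs ++ xs.filter (fun t => k t == 0)) ++ (os ++ xs.filter (fun t => k t == 1)) := by
  induction xs generalizing zs os with
  | nil => simp
  | cons x xs' ih =>
    rcases hx x (by simp) with h0 | h1
    · have step : PySem.List.insertBy (fun a b => decide (k a < k b)) x (zs ++ os)
          = (zs ++ [x]) ++ os := by
        rw [insertBy_middle _ x zs os
          (fun y hy => by simp [hz y hy, h0])
          (fun y hy => by simp [ho y hy, h0])]
        simp
      simp only [List.foldl_cons, step]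
      rw [ih (zs ++ [x]) os
        (fun y hy => by rcases List.mem_append.mp hy with h | h
                        · exact hz y h
                        · simp at h; simpa [h] using h0) ho
        (fun t ht => hx t (by simp [ht]))]
      simp [h0]
    · have step : PySem.List.insertBy (fun a b => decide (k a < k b)) x (zs ++ os)
          = zs ++ (os ++ [x]) := by
        rw [PySem.List.insertBy_of_forall_not_before _ x (zs ++ os)
          (fun y hy => by rcases List.mem_append.mp hy with h | h
                          · simp [hz y h, h1]
                          · simp [ho y h, h1])]
        simp
      simp only [List.foldl_cons, step]
      rw [ih zs (os ++ [x]) hz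
        (fun y hy => by rcases List.mem_append.mp hy with h | h
                        · exact ho y h
                        · simp at h; simpa [h] using h1)
        (fun t ht => hx t (by simp [ht]))]
      simp [h1]

theorem sorted_two_valued {α : Type} (k : α → Int) (xs : List α)
    (hx : ∀ t ∈ xs, k t = 0 ∨ k t = 1) :
    PySem.List.sorted xs k = xs.filter (fun t => k t == 0) ++ xs.filter (fun t => k t == 1) := by
  rw [PySem.List.sorted_eq_foldl_insertBy]
  simpa using foldl_insertBy_two_valued k xs [] [] (by simp) (by simp) hx

-- ===== VERDICT (by name: the statement is the Claim_ definition above) =====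
theorem filter_triplets_spec : Claim_equal_filter_triplets := by
  intro npl nt _
  unfold Spec_filter_triplets filter_triplets filter_triplets_alt
  obtain ⟨x, y, z⟩ := nt
  have hmem : ∀ t ∈ (npl.filter (fun t => ft_category x y z t != 2)),
      ft_category x y z t = 0 ∨ ft_category x y z t = 1 := by
    intro t ht
    have := List.of_mem_filter ht
    unfold ft_category at this ⊢
    by_cases h1 : t.1 = x <;> by_cases h2 : t.2.1 = y <;> by_cases h3 : t.2.2 = z <;>
      simp_all
  dsimp only
  rw [sorted_two_valued (ft_category x y z) _ hmem]
  rw [List.filter_filter, List.filter_filter]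
  congr 1 <;> exact List.filter_congr (fun t _ => by
    unfold ft_category
    by_cases h1 : t.1 = x <;> by_cases h2 : t.2.1 = y <;> by_cases h3 : t.2.2 = z <;>
      simp_all)
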